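-- pv_equiv track=rewrite | github.com/bnursik/aitu-daa-asik3 | mst-assignment/mst/scripts/generate_inputs.py | random_node_names
-- ===== SOURCE A (Python) =====
-- import string
--
-- def random_node_names(v_count):
--     # Use letters A, B, C... then AA, AB... if more than 26 nodes
--     names = []
--     alphabet = string.ascii_uppercase
--     for i in range(v_count):
--         name = ""
--         n = i
--         while True:
--             name = alphabet[n % 26] + name
--             n //= 26
--             if n == 0:
--                 break
--         names.append(name)
--     return names
-- ===== SOURCE B (Python) =====
-- def random_node_names(v_count):
--     # Odometer: keep the current name as a little-endian list of base-26 digit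
--     # values, record it each iteration, then increment it with carry.
--     def inc(ds):
--         # increment a little-endian digit list by one
--         if not ds:
--             return [1]
--         d = ds[0] + 1
--         if d == 26:
--             return [0] + inc(ds[1:])
--         return [d] + ds[1:]
--
--     names = []
--     ds = [0]
--     for _ in range(v_count):
--         names.append("".join(chr(65 + d) for d in reversed(ds)))
--         ds = inc(ds)
--     return names
-- ===== Notes on version B (the rewrite author's own statement) =====
-- stated objective: alternative
-- what changed: A converts each index i independently to base-26 by a repeated divmod loop; B keeps the current name as a little-endian digit list carried across iterations and increments it like an odometer (carry propagation, new leading digit on overflow).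
import Mathlib
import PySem

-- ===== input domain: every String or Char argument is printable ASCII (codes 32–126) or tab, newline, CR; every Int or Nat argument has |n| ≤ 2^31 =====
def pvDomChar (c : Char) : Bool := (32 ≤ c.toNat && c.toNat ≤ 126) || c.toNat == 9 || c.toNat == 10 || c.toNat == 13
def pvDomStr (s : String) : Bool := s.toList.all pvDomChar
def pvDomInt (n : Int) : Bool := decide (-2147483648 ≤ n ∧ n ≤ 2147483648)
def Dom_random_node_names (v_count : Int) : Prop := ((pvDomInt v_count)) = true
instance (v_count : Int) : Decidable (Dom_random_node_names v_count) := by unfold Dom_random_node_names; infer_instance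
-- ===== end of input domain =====

-- B re-implements A's per-index base-26 divmod loop as an odometer over a carried digit list (objective: alternative; same cost).

-- ===== PORT A =====
-- string.ascii_uppercase
def pvAlpha : List Char :=
  ['A','B','C','D','E','F','G','H','I','J','K','L','M','N','O','P','Q','R','S','T','U','V','W','X','Y','Z']

-- the inner `while True` of A; exact for n ≥ 0, which holds at the only call
-- site (n = i drawn from range(v_count)), so Nat `%`/`/` coincide with
-- Python's `%`/`//` here and alphabet[n % 26] is always in range.
def aNameLoop (n : Nat) (name : List Char) : List Char :=
  let name' := pvAlpha.getD (n % 26) 'A' :: name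
  if n / 26 = 0 then name' else aNameLoop (n / 26) name'
termination_by n
decreasing_by omega

def random_node_names (v_count : Int) : List String :=
  (PySem.List.pyRange 0 v_count 1).foldl
    (fun names i => names ++ [String.mk (aNameLoop i.toNat [])]) []

-- ===== PORT B =====
-- Source B's `inc`: increment a little-endian base-26 digit list by one
def incDigits : List Nat → List Nat
  | [] => [1]
  | d :: rest => if d + 1 = 26 then 0 :: incDigits rest else (d + 1) :: rest

-- Source B's for-loop: record the rendered current digit list, then increment it
def bGo : Nat → List Nat → List String
  | 0, _ => []
  | k + 1, ds =>
      String.mk (ds.reverse.map (fun d => Char.ofNat (65 + d))) :: bGo k (incDigits ds)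

def random_node_names_alt (v_count : Int) : List String := bGo v_count.toNat [0]

-- ===== PRECONDITION & SPEC =====
def Spec_random_node_names (v_count : Int) (out : List String) : Prop := out = random_node_names_alt v_count
instance (v_count : Int) (out : List String) : Decidable (Spec_random_node_names v_count out) := by unfold Spec_random_node_names; infer_instance

-- ===== CLAIM (what is proved, stated in full; the proofs are below) =====
def Claim_equal_random_node_names : Prop := ∀ (v_count : Int), Dom_random_node_names v_count → Spec_random_node_names v_count (random_node_names v_count)

-- ===== LEMMAS AND PROOFS =====

-- little-endian base-26 digits of n (at least one digit): the mathematical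
-- object both ports compute representations of
def revDigits (n : Nat) : List Nat :=
  if h : n < 26 then [n] else n % 26 :: revDigits (n / 26)
termination_by n
decreasing_by omega

lemma revDigits_small {n : Nat} (h : n < 26) : revDigits n = [n] := by
  rw [revDigits]; simp [h]

lemma revDigits_big {n : Nat} (h : ¬ n < 26) : revDigits n = n % 26 :: revDigits (n / 26) := by
  rw [revDigits]; simp [h]

lemma revDigits_lt (n : Nat) : ∀ d ∈ revDigits n, d < 26 := by
  induction n using revDigits.induct with
  | case1 n h => rw [revDigits]; simp [h]
  | case2 n h ih =>
      rw [revDigits]; simp only [h, dite_false]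
      intro d hd
      rcases List.mem_cons.mp hd with h1 | h2
      · omega
      · exact ih d h2

lemma aNameLoop_eq (n : Nat) (name : List Char) :
    aNameLoop n name = (revDigits n).reverse.map (fun d => pvAlpha.getD d 'A') ++ name := by
  induction n using revDigits.induct generalizing name with
  | case1 n h =>
      rw [aNameLoop, revDigits_small h]
      have : n / 26 = 0 := by omega
      simp [this, Nat.mod_eq_of_lt h]
  | case2 n h ih =>
      rw [aNameLoop, revDigits_big h]
      have hne : ¬ n / 26 = 0 := by omega
      simp only [hne, if_false, ih]
      simp

lemma incDigits_revDigits (n : Nat) : incDigits (revDigits n) = revDigits (n + 1) := by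
  induction n using Nat.strong_induction_on with
  | _ n ih =>
      by_cases h26 : n < 26
      · by_cases h25 : n < 25
        · rw [revDigits_small h26, revDigits_small (show n + 1 < 26 by omega)]
          simp [incDigits, show ¬ (n + 1 = 26) by omega]
        · have hn : n = 25 := by omega
          subst hn
          rw [revDigits_small (by norm_num), revDigits_big (by norm_num)]
          rw [revDigits_small (by norm_num)]
          simp [incDigits]
      · by_cases hm : n % 26 = 25
        · rw [revDigits_big h26, revDigits_big (show ¬ n + 1 < 26 by omega)]
          simp only [incDigits, show n % 26 + 1 = 26 by omega, if_true]
          rw [ih (n / 26) (by omega)]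
          have h1 : (n + 1) % 26 = 0 := by omega
          have h2 : (n + 1) / 26 = n / 26 + 1 := by omega
          rw [h1, h2]
        · rw [revDigits_big h26, revDigits_big (show ¬ n + 1 < 26 by omega)]
          simp only [incDigits, show ¬ (n % 26 + 1 = 26) by omega, if_false]
          have h1 : (n + 1) % 26 = n % 26 + 1 := by omega
          have h2 : (n + 1) / 26 = n / 26 := by omega
          rw [h1, h2]

lemma char_render (d : Nat) (hd : d < 26) :
    Char.ofNat (65 + d) = pvAlpha.getD d 'A' := by
  interval_cases d <;> rfl

lemma render_eq (n : Nat) :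
    (revDigits n).reverse.map (fun d => Char.ofNat (65 + d))
      = (revDigits n).reverse.map (fun d => pvAlpha.getD d 'A') := by
  apply List.map_congr_left
  intro d hd
  exact char_render d (revDigits_lt n d (List.mem_reverse.mp hd))

lemma bGo_eq (k m : Nat) :
    bGo k (revDigits m)
      = (List.range k).map (fun j => String.mk (aNameLoop (m + j) [])) := by
  induction k generalizing m with
  | zero => simp [bGo]
  | succ k ih =>
      rw [bGo, incDigits_revDigits, ih]
      rw [List.range_succ_eq_map]
      simp only [List.map_cons, List.map_map]
      congr 1
      · rw [aNameLoop_eq, render_eq]; simp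
      · apply List.map_congr_left
        intro j _
        have h : m + 1 + j = m + j.succ := by omega
        rw [Function.comp_apply, h]

lemma foldl_append_map {α β : Type} (l : List α) (f : α → β) (init : List β) :
    l.foldl (fun acc x => acc ++ [f x]) init = init ++ l.map f := by
  induction l generalizing init with
  | nil => simp
  | cons x xs ih => simp [List.foldl_cons, ih]

-- ===== VERDICT (by name: the statement is the Claim_ definition above) =====
theorem random_node_names_spec : Claim_equal_random_node_names := by
  intro v _
  show _ = _
  unfold random_node_names random_node_names_alt
  rw [PySem.List.pyRange_one, foldl_append_map, List.map_map]
  have h0 : revDigits 0 = [0] := revDigits_small (by norm_num)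
  rw [← h0, bGo_eq]
  simp only [List.nil_append, Int.sub_zero]
  apply List.map_congr_left
  intro k _
  simp [Function.comp]
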